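-- pv_equiv track=rewrite | github.com/andrew-kudrenko/university-labs | lab7_v10.py | delete_side_diagonal
-- ===== SOURCE A (Python) =====
-- def delete_side_diagonal(matrix):
--     handled = []
--
--     for y in range(len(matrix)):
--         row = []
--         for x in range(len(matrix[y])):
--             if x != len(matrix) - y - 1:
--                 row.append(matrix[y][x])
--
--         handled.append(row)
--
--     return handled
-- ===== SOURCE B (Python) =====
-- def delete_side_diagonal(matrix):
--     n = len(matrix)
--     result = []
--     for y, row in enumerate(matrix):
--         idx = n - y - 1
--         if 0 <= idx < len(row):
--             result.append(row[:idx] + row[idx + 1:])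
--         else:
--             result.append(list(row))
--     return result
-- ===== Notes on version B (the rewrite author's own statement) =====
-- stated objective: simpler
-- what changed: Replaces A's per-element inner filter loop over each row by computing the single anti-diagonal column index per row and building the new row with two slices (row[:idx] + row[idx+1:]), copying the row whole when the index is out of range.
import Mathlib
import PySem

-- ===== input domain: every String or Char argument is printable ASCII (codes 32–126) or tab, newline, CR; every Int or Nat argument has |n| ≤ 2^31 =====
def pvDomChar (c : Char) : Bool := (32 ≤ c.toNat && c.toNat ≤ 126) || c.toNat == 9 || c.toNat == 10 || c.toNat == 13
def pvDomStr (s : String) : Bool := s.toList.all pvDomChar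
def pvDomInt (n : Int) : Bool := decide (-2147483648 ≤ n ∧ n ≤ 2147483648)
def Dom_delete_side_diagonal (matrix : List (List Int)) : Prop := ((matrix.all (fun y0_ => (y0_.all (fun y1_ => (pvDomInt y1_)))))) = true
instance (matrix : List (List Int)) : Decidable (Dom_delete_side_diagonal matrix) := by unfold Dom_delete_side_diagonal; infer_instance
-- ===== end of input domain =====

-- B replaces A's per-element inner filter loop by a closed-form skip index and slice
-- concatenation per row (objective: simpler; no speed claim).

-- ===== PORT A =====
def delete_side_diagonal (matrix : List (List Int)) : List (List Int) :=
  (PySem.List.pyRange 0 (matrix.length : Int)).foldl (fun handled y =>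
    handled ++ [(PySem.List.pyRange 0 (((PySem.List.pyGetD matrix y []).length : Int))).foldl
      (fun row x =>
        if x ≠ (matrix.length : Int) - y - 1 then
          row ++ [PySem.List.pyGetD (PySem.List.pyGetD matrix y []) x 0]
        else row) []]) []

-- ===== PORT B =====
def delete_side_diagonal_alt (matrix : List (List Int)) : List (List Int) :=
  (PySem.List.enumerate matrix).foldl (fun result p =>
    if 0 ≤ (matrix.length : Int) - p.1 - 1 ∧ (matrix.length : Int) - p.1 - 1 < (p.2.length : Int) then
      result ++ [PySem.List.slice p.2 none (some ((matrix.length : Int) - p.1 - 1)) ++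
        PySem.List.slice p.2 (some ((matrix.length : Int) - p.1 - 1 + 1)) none]
    else
      result ++ [p.2]) []

-- ===== PRECONDITION & SPEC =====
def Spec_delete_side_diagonal (matrix : List (List Int)) (out : List (List Int)) : Prop := out = delete_side_diagonal_alt matrix
instance (matrix : List (List Int)) (out : List (List Int)) : Decidable (Spec_delete_side_diagonal matrix out) := by unfold Spec_delete_side_diagonal; infer_instance

-- ===== CLAIM (what is proved, stated in full; the proofs are below) =====
def Claim_equal_delete_side_diagonal : Prop := ∀ (matrix : List (List Int)), Dom_delete_side_diagonal matrix → Spec_delete_side_diagonal matrix (delete_side_diagonal matrix)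

-- ===== LEMMAS AND PROOFS =====

-- A's inner index-filter loop, in Nat-range form, equals "delete element c" (or the whole row).
theorem rowFilter_eq (r : List Int) (c : Int) :
    ((List.range r.length).filter (fun (k : Nat) => decide ((k : Int) ≠ c))).map (fun k => r.getD k 0) =
      if 0 ≤ c ∧ c < (r.length : Int) then r.take c.toNat ++ r.drop (c.toNat + 1) else r := by
  induction r generalizing c with
  | nil => simp
  | cons a t ih =>
    rw [List.length_cons, List.range_succ_eq_map, List.filter_cons, List.filter_map]
    have hpred : ((fun (k : Nat) => decide ((k : Int) ≠ c)) ∘ Nat.succ) =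
        fun (k : Nat) => decide ((k : Int) ≠ c - 1) := by
      funext k
      simp only [Function.comp_apply]
      rw [decide_eq_decide]
      push_cast
      omega
    rw [hpred]
    have hmapsucc : ((fun (k : Nat) => (a :: t).getD k 0) ∘ Nat.succ) =
        fun (k : Nat) => t.getD k 0 := by
      funext k; simp
    by_cases hc0 : c = 0
    · subst hc0
      have h0 : (decide (((0 : Nat) : Int) ≠ (0 : Int))) = false := by simp
      rw [h0]
      simp only [Bool.false_eq_true, if_false]
      rw [List.map_map, hmapsucc, ih (0 - 1)]
      rw [if_neg (show ¬(0 ≤ (0:Int) - 1 ∧ (0:Int) - 1 < (t.length : Int)) by intro hcon; omega),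
        if_pos (show 0 ≤ (0:Int) ∧ (0:Int) < (((t.length + 1 : Nat)) : Int) by norm_num)]
      simp
    · have h0 : (decide (((0 : Nat) : Int) ≠ c)) = true := by
        simp only [decide_eq_true_eq]
        intro h; exact hc0 (by omega)
      rw [h0]
      simp only [if_true]
      rw [List.map_cons, List.map_map, hmapsucc, ih (c - 1)]
      simp only [List.getD_cons_zero]
      by_cases h : 0 ≤ c - 1 ∧ c - 1 < (t.length : Int)
      · obtain ⟨h1, h2⟩ := h
        rw [if_pos ⟨h1, h2⟩,
          if_pos (show 0 ≤ c ∧ c < (((t.length + 1 : Nat)) : Int) by push_cast; omega)]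
        have hct : c.toNat = (c - 1).toNat + 1 := by omega
        rw [hct]
        simp [List.take_succ_cons, List.drop_succ_cons]
      · rw [if_neg h, if_neg (by push_cast at h ⊢; omega)]

-- map over enumerate = map over the index range (elements read back with getD).
theorem enum_map_eq {α β : Type} (xs : List α) (s : Int) (d : α) (f : Int × α → β) :
    (PySem.List.enumerate xs s).map f =
      (List.range xs.length).map (fun (k : Nat) => f (s + (k : Int), xs.getD k d)) := by
  induction xs generalizing s with
  | nil => simp [PySem.List.enumerate]
  | cons x t ih =>
    rw [PySem.List.enumerate_cons, List.map_cons, List.length_cons, List.range_succ_eq_map,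
      List.map_cons, List.map_map, ih (s + 1)]
    congr 1
    · simp
    · apply List.map_congr_left
      intro k _
      simp only [Function.comp_apply, List.getD_cons_succ]
      congr 2
      push_cast
      ring

-- A as a map over the row-index range.
theorem portA_eq (matrix : List (List Int)) :
    delete_side_diagonal matrix =
      (List.range matrix.length).map (fun (y : Nat) =>
        let r := matrix.getD y []
        let c := (matrix.length : Int) - (y : Int) - 1
        if 0 ≤ c ∧ c < (r.length : Int) then r.take c.toNat ++ r.drop (c.toNat + 1) else r) := by
  unfold delete_side_diagonal
  rw [PySem.List.foldl_append_singleton_eq_map, List.nil_append,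
    PySem.List.pyRange_zero_nat, List.map_map]
  apply List.map_congr_left
  intro y _
  simp only [Function.comp_apply, PySem.List.pyGetD_natCast]
  have hif : (fun (row : List Int) (x : Int) =>
      if x ≠ (matrix.length : Int) - (y : Int) - 1 then
        row ++ [PySem.List.pyGetD (matrix.getD y []) x 0] else row)
      = (fun (row : List Int) (x : Int) =>
        if (fun (x : Int) => decide (x ≠ (matrix.length : Int) - (y : Int) - 1)) x = true then
          row ++ [(fun (x : Int) => PySem.List.pyGetD (matrix.getD y []) x 0) x] else row) := by
    funext row x; simp only [decide_eq_true_eq]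
  rw [hif, PySem.List.foldl_append_if, List.nil_append, PySem.List.pyRange_zero_nat,
    List.filter_map, List.map_map]
  have hg : ((fun (x : Int) => PySem.List.pyGetD (matrix.getD y []) x 0) ∘ (fun (k : Nat) => (k : Int)))
      = fun (k : Nat) => (matrix.getD y []).getD k 0 := by
    funext k; simp [PySem.List.pyGetD_natCast]
  rw [hg]
  exact rowFilter_eq (matrix.getD y []) ((matrix.length : Int) - (y : Int) - 1)

-- B as the same map.
theorem portB_eq (matrix : List (List Int)) :
    delete_side_diagonal_alt matrix =
      (List.range matrix.length).map (fun (y : Nat) =>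
        let r := matrix.getD y []
        let c := (matrix.length : Int) - (y : Int) - 1
        if 0 ≤ c ∧ c < (r.length : Int) then r.take c.toNat ++ r.drop (c.toNat + 1) else r) := by
  unfold delete_side_diagonal_alt
  have hsplit : (fun (result : List (List Int)) (p : Int × List Int) =>
      if 0 ≤ (matrix.length : Int) - p.1 - 1 ∧ (matrix.length : Int) - p.1 - 1 < (p.2.length : Int) then
        result ++ [PySem.List.slice p.2 none (some ((matrix.length : Int) - p.1 - 1)) ++
          PySem.List.slice p.2 (some ((matrix.length : Int) - p.1 - 1 + 1)) none]
      else result ++ [p.2])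
      = (fun (result : List (List Int)) (p : Int × List Int) => result ++
        [if 0 ≤ (matrix.length : Int) - p.1 - 1 ∧ (matrix.length : Int) - p.1 - 1 < (p.2.length : Int) then
          PySem.List.slice p.2 none (some ((matrix.length : Int) - p.1 - 1)) ++
            PySem.List.slice p.2 (some ((matrix.length : Int) - p.1 - 1 + 1)) none
        else p.2]) := by
    funext result p
    by_cases h : 0 ≤ (matrix.length : Int) - p.1 - 1 ∧ (matrix.length : Int) - p.1 - 1 < (p.2.length : Int)
    · rw [if_pos h, if_pos h]
    · rw [if_neg h, if_neg h]
  rw [hsplit, PySem.List.foldl_append_singleton_eq_map, List.nil_append,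
    enum_map_eq matrix 0 []]
  apply List.map_congr_left
  intro k _
  simp only [zero_add]
  by_cases h : 0 ≤ (matrix.length : Int) - (k : Int) - 1 ∧
      (matrix.length : Int) - (k : Int) - 1 < ((matrix.getD k []).length : Int)
  · rw [if_pos h, if_pos h, PySem.List.slice_to _ h.1, PySem.List.slice_from _ (by omega)]
    rw [show ((matrix.length : Int) - (k : Int) - 1 + 1).toNat
        = ((matrix.length : Int) - (k : Int) - 1).toNat + 1 from by omega]
  · rw [if_neg h, if_neg h]

-- ===== VERDICT (by name: the statement is the Claim_ definition above) =====
theorem delete_side_diagonal_spec : Claim_equal_delete_side_diagonal := by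
  intro matrix _
  unfold Spec_delete_side_diagonal
  rw [portA_eq, portB_eq]
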